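-- pv_equiv track=rewrite | github.com/nikhila29/10XAcademy | Python programs/both_x.py | bothCountX
-- ===== SOURCE A (Python) =====
-- def bothCountX(string1, string2, x):
--     # Complete this function, and return the list of resultant characters in sorted order
--     string1=string1.lower()
--     string2=string2.lower()
--     dict1={}
--     dict2={}
--     for i in string1:
--     	if i in dict1:
--     		dict1[i]+=1
--     	else:
--     		dict1[i]=1
--     for i in string2:
--     	if i in dict2:
--     		dict2[i]+=1
--     	else:
--     		dict2[i]=1
--     result=[]
--     for i in sorted(dict1.keys()):
--     	if i in dict2:
--     		if dict1[i]==x and dict2[i]==x: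
--     			result.append(i)
--     return(result)
-- ===== SOURCE B (Python) =====
-- def bothCountX(string1, string2, x):
--     # Sort each lowercased string, scan runs of equal chars to collect those whose
--     # run length is exactly x (already in sorted order, no dict/set needed), then
--     # intersect the two sorted duplicate-free lists with a two-pointer merge.
--     def exact_runs(s):
--         t = sorted(s.lower())
--         out = []
--         i = 0
--         n = len(t)
--         while i < n:
--             j = i
--             while j < n and t[j] == t[i]:
--                 j += 1
--             if j - i == x:
--                 out.append(t[i])
--             i = j
--         return out
--     a = exact_runs(string1)
--     b = exact_runs(string2)
--     res = []
--     i = j = 0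
--     while i < len(a) and j < len(b):
--         if a[i] == b[j]:
--             res.append(a[i])
--             i += 1
--             j += 1
--         elif a[i] < b[j]:
--             i += 1
--         else:
--             j += 1
--     return res
-- ===== Notes on version B (the rewrite author's own statement) =====
-- stated objective: alternative
-- what changed: Replaces A's two hash-count dicts probed inside a sorted key loop with a dict-free sort-and-scan algorithm: each lowercased string is sorted, a run-length scan over the sorted characters emits exactly the chars whose run length equals x (already in order), and the two resulting strictly increasing lists are intersected by a two-pointer merge.
import Mathlib
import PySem

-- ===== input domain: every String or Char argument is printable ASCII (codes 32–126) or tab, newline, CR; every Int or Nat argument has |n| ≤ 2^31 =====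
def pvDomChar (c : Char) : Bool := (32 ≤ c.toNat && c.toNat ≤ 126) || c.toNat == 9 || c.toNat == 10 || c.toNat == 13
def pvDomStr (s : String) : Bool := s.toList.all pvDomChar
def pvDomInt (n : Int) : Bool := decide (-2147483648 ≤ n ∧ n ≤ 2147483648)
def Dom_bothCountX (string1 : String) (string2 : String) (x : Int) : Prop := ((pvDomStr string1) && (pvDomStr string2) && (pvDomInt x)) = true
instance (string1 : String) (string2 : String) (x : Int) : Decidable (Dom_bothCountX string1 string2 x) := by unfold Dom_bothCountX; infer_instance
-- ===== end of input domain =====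

-- B is dict-free: it sorts each lowercased string, a run-length scan over the sorted
-- characters emits the chars whose run length is exactly x (in order), and the two
-- strictly increasing lists are intersected by a two-pointer merge (alternative algorithm).

-- ===== PORT A =====
-- literal port: chars of the lowercased strings are the dict keys (single-char strings in
-- Python; ordering of single-char strings = ordering of chars), result chars boxed as String
def bothCountX (string1 : String) (string2 : String) (x : Int) : List String :=
  let s1 := (PySem.Str.lower string1).toList
  let s2 := (PySem.Str.lower string2).toList
  let dict1 := s1.foldl (fun d i => if d.contains i then d.insert i (d.getD i 0 + 1) else d.insert i 1) PySem.Dict.empty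
  let dict2 := s2.foldl (fun d i => if d.contains i then d.insert i (d.getD i 0 + 1) else d.insert i 1) PySem.Dict.empty
  (PySem.List.sorted dict1.keys (fun c => c) false).foldl
    (fun result i =>
      if dict2.contains i then
        if dict1.getD i 0 == x && dict2.getD i 0 == x then result ++ [String.ofList [i]] else result
      else result) []

-- ===== PORT B =====
-- outer while of exact_runs: structural recursion over the sorted char list; the inner
-- while advancing j over the run is takeWhile/dropWhile on the same predicate t[j] == t[i]
def pvExactRuns (x : Int) : List Char → List Char
  | [] => []
  | c :: rest =>
    (if ((rest.takeWhile (· == c)).length + 1 : Int) == x then [c] else []) ++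
      pvExactRuns x (rest.dropWhile (· == c))
termination_by t => t.length
decreasing_by
  have := List.length_dropWhile_le (· == c) rest
  simp; omega

-- the two-pointer intersection merge, appending the common chars boxed as single-char strings
def pvMerge : List Char → List Char → List String
  | a :: as, b :: bs =>
    if a == b then String.ofList [a] :: pvMerge as bs
    else if a < b then pvMerge as (b :: bs)
    else pvMerge (a :: as) bs
  | _, _ => []
termination_by as bs => as.length + bs.length

def bothCountX_alt (string1 : String) (string2 : String) (x : Int) : List String :=
  let a := pvExactRuns x (PySem.List.sorted (PySem.Str.lower string1).toList (fun c => c) false)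
  let b := pvExactRuns x (PySem.List.sorted (PySem.Str.lower string2).toList (fun c => c) false)
  pvMerge a b

-- ===== PRECONDITION & SPEC =====
def Spec_bothCountX (string1 : String) (string2 : String) (x : Int) (out : List String) : Prop := out = bothCountX_alt string1 string2 x
instance (string1 : String) (string2 : String) (x : Int) (out : List String) : Decidable (Spec_bothCountX string1 string2 x out) := by unfold Spec_bothCountX; infer_instance

-- ===== CLAIM (what is proved, stated in full; the proofs are below) =====
def Claim_equal_bothCountX : Prop := ∀ (string1 : String) (string2 : String) (x : Int), Dom_bothCountX string1 string2 x → Spec_bothCountX string1 string2 x (bothCountX string1 string2 x)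

-- ===== LEMMAS AND PROOFS =====

-- A's branched counting step is pointwise the uniform counter step
theorem pv_step_eq :
    (fun (d : PySem.Dict Char Int) i => if d.contains i then d.insert i (d.getD i 0 + 1) else d.insert i 1)
      = fun (d : PySem.Dict Char Int) i => d.insert i (d.getD i 0 + 1) := by
  funext d i
  by_cases h : d.contains i
  · simp [h]
  · simp only [Bool.not_eq_true] at h
    rw [PySem.Dict.getD_of_not_contains d 0 h]; simp [h]

-- A's result, on the lowercased character lists: the sorted intersection of the two
-- "count equals x" character sets, boxed
theorem pv_main (l1 l2 : List Char) (x : Int) :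
    (PySem.List.sorted (PySem.Dict.counter l1).keys (fun c => c) false).foldl
      (fun result i =>
        if (PySem.Dict.counter l2).contains i then
          if (PySem.Dict.counter l1).getD i 0 == x && (PySem.Dict.counter l2).getD i 0 == x then
            result ++ [String.ofList [i]] else result
        else result) []
    = (PySem.List.sorted
        (PySem.Set.inter (PySem.Set.ofList ((PySem.Set.ofList l1).filter (fun c => (l1.count c : Int) == x)))
                         (PySem.Set.ofList ((PySem.Set.ofList l2).filter (fun c => (l2.count c : Int) == x))))
        (fun c => c) false).map (fun c => String.ofList [c]) := by
  have hstep : (fun (result : List String) i =>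
        if (PySem.Dict.counter l2).contains i then
          if (PySem.Dict.counter l1).getD i 0 == x && (PySem.Dict.counter l2).getD i 0 == x then
            result ++ [String.ofList [i]] else result
        else result)
      = fun result i =>
        if ((PySem.Dict.counter l2).contains i &&
            ((PySem.Dict.counter l1).getD i 0 == x && (PySem.Dict.counter l2).getD i 0 == x)) then
          result ++ [String.ofList [i]] else result := by
    funext result i
    by_cases h : (PySem.Dict.counter l2).contains i <;> simp [h]
  rw [hstep, PySem.List.foldl_append_if]
  simp only [List.nil_append]
  congr 1
  have hkeys : (PySem.Dict.counter l1).keys = PySem.Set.ofList l1 := PySem.Dict.keys_counter l1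
  rw [hkeys]
  refine (PySem.List.sorted_eq_of_perm_of_pairwise_lt _ _ (fun c : Char => c) ?_ ?_).symm
  · have hnd1 : (PySem.List.sorted (PySem.Set.ofList l1) (fun c => c) false).Nodup :=
      (PySem.List.sorted_perm (PySem.Set.ofList l1) (fun c => c) false).symm.nodup
        (PySem.Set.nodup_ofList l1)
    refine (List.perm_ext_iff_of_nodup (hnd1.filter _) ?_).2 ?_
    · simp only [PySem.Set.inter]
      exact (PySem.Set.nodup_ofList _).filter _
    · intro a
      simp only [List.mem_filter, PySem.List.mem_sorted, PySem.Set.mem_ofList,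
        PySem.Set.mem_inter, PySem.Dict.contains_counter, PySem.Dict.getD_counter,
        Bool.and_eq_true, beq_iff_eq, List.contains_iff_mem]
      constructor
      · rintro ⟨h1, h2, h3, h4⟩; exact ⟨⟨h1, h3⟩, h2, h4⟩
      · rintro ⟨⟨h1, h3⟩, h2, h4⟩; exact ⟨h1, h2, h3, h4⟩
  · exact (PySem.List.sorted_ofList_pairwise_lt l1).filter _

-- on a nondecreasing list, every element of the dropped run's suffix is strictly greater than the head
theorem pv_drop_gt (c : Char) (rest : List Char) (h : (c :: rest).Pairwise (· ≤ ·)) :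
    ∀ d ∈ rest.dropWhile (· == c), c < d := by
  intro d hd
  have hmem : d ∈ rest := (List.dropWhile_sublist _).subset hd
  have hle : c ≤ d := (List.pairwise_cons.1 h).1 d hmem
  rcases lt_or_eq_of_le hle with h' | h'
  · exact h'
  · exfalso
    subst h'
    have hq : (rest.dropWhile (· == c)).Pairwise (· ≤ ·) :=
      (List.pairwise_cons.1 h).2.sublist (List.dropWhile_sublist _)
    cases hq' : rest.dropWhile (· == c) with
    | nil => simp [hq'] at hd
    | cons e q =>
      have he : (e == c) = false := by
        have h0 := List.head?_dropWhile_not (· == c) rest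
        rw [hq'] at h0; exact h0
      have hce : c ≤ e := (List.pairwise_cons.1 h).1 e ((List.dropWhile_sublist _).subset (by rw [hq']; exact List.mem_cons_self))
      rw [hq'] at hd
      rcases List.mem_cons.1 hd with rfl | hd'
      · simp at he
      · have hec : e ≤ c := (List.pairwise_cons.1 (hq' ▸ hq)).1 c hd'
        have : e = c := le_antisymm hec hce
        simp [this] at he

-- membership characterisation of the run scan on a nondecreasing list
theorem pv_runs_mem (x : Int) (t : List Char) (h : t.Pairwise (· ≤ ·)) (d : Char) :
    d ∈ pvExactRuns x t ↔ d ∈ t ∧ (t.count d : Int) = x := by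
  induction t using pvExactRuns.induct with
  | case1 => simp [pvExactRuns]
  | case2 c rest ih =>
    have hpq := List.takeWhile_append_dropWhile (p := (· == c)) (l := rest)
    set p := rest.takeWhile (· == c) with hp
    set q := rest.dropWhile (· == c) with hqdef
    have hpc : ∀ e ∈ p, e = c := fun e he => by
      have := List.mem_takeWhile_imp he; simpa using this
    have hqgt : ∀ e ∈ q, c < e := pv_drop_gt c rest h
    have hqsorted : q.Pairwise (· ≤ ·) :=
      (List.pairwise_cons.1 h).2.sublist (List.dropWhile_sublist _)
    have hcq : c ∉ q := fun hc => lt_irrefl c (hqgt c hc)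
    have hcountp : p.count c = p.length := List.count_eq_length.2 (fun b hb => ((hpc b hb).symm : c = b) ▸ rfl)
    have hcountc : ((c :: rest).count c : Int) = (p.length : Int) + 1 := by
      rw [List.count_cons_self, ← hpq, List.count_append]
      rw [hcountp, List.count_eq_zero.2 hcq]
      push_cast; ring
    have hcount_ne : ∀ e, e ≠ c → (c :: rest).count e = q.count e := by
      intro e hne
      rw [List.count_cons_of_ne (Ne.symm hne), ← hpq, List.count_append,
        List.count_eq_zero.2 (fun hep => hne (hpc e hep))]
      simp
    rw [pvExactRuns, ← hp, ← hqdef]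
    by_cases hx : ((p.length : Int) + 1) = x
    · rw [if_pos (beq_iff_eq.mpr hx)]
      simp only [List.singleton_append, List.mem_cons]
      rw [ih hqsorted]
      constructor
      · rintro (rfl | ⟨hdq, hcnt⟩)
        · exact ⟨Or.inl rfl, hcountc.trans hx⟩
        · refine ⟨Or.inr (hpq ▸ List.mem_append_right p hdq), ?_⟩
          rw [hcount_ne d (fun hdc => hcq (hdc ▸ hdq))]; exact hcnt
      · rintro ⟨hdm, hcnt⟩
        by_cases hdc : d = c
        · exact Or.inl hdc
        · right
          have hdr : d ∈ rest := hdm.resolve_left hdc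
          have hdq : d ∈ q := by
            rcases List.mem_append.1 (hpq ▸ hdr) with hdp | hdq
            · exact absurd (hpc d hdp) hdc
            · exact hdq
          refine ⟨hdq, ?_⟩
          rw [← hcount_ne d hdc]; exact hcnt
    · rw [if_neg (by simpa using hx)]
      simp only [List.nil_append]
      rw [ih hqsorted]
      constructor
      · rintro ⟨hdq, hcnt⟩
        refine ⟨List.mem_cons_of_mem _ (hpq ▸ List.mem_append_right p hdq), ?_⟩
        rw [hcount_ne d (fun hdc => hcq (hdc ▸ hdq))]; exact hcnt
      · rintro ⟨hdm, hcnt⟩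
        by_cases hdc : d = c
        · exact absurd (show ((p.length : Int) + 1) = x by
            rw [← hcnt, hdc]; exact hcountc.symm) hx
        · have hdr : d ∈ rest := (List.mem_cons.1 hdm).resolve_left hdc
          have hdq : d ∈ q := by
            rcases List.mem_append.1 (hpq ▸ hdr) with hdp | hdq
            · exact absurd (hpc d hdp) hdc
            · exact hdq
          exact ⟨hdq, by rw [← hcount_ne d hdc]; exact hcnt⟩

-- the run scan of a nondecreasing list is strictly increasing
theorem pv_runs_pairwise (x : Int) (t : List Char) (h : t.Pairwise (· ≤ ·)) :
    (pvExactRuns x t).Pairwise (· < ·) := by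
  induction t using pvExactRuns.induct with
  | case1 => simp [pvExactRuns]
  | case2 c rest ih =>
    have hqsorted : (rest.dropWhile (· == c)).Pairwise (· ≤ ·) :=
      (List.pairwise_cons.1 h).2.sublist (List.dropWhile_sublist _)
    have hqgt : ∀ e ∈ rest.dropWhile (· == c), c < e := pv_drop_gt c rest h
    have hrec : (pvExactRuns x (rest.dropWhile (· == c))).Pairwise (· < ·) := ih hqsorted
    rw [pvExactRuns]
    by_cases hx : (((rest.takeWhile (· == c)).length : Int) + 1 == x) = true
    · rw [if_pos hx]
      simp only [List.cons_append, List.nil_append, List.pairwise_cons]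
      refine ⟨fun e he => hqgt e ((pv_runs_mem x _ hqsorted e).1 he).1, hrec⟩
    · rw [if_neg hx]; simpa using hrec

-- the two-pointer merge of strictly increasing lists is the boxed filtered intersection
theorem pv_merge_eq (as bs : List Char) (ha : as.Pairwise (· < ·)) (hb : bs.Pairwise (· < ·)) :
    pvMerge as bs = (as.filter (fun c => bs.contains c)).map (fun c => String.ofList [c]) := by
  induction as, bs using pvMerge.induct with
  | case1 a as b bs hab ih =>
    have hab' : a = b := by simpa using hab
    rw [pvMerge, if_pos hab]
    rw [ih (List.pairwise_cons.1 ha).2 (List.pairwise_cons.1 hb).2]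
    have hfa : ((a :: as).filter (fun c => (b :: bs).contains c)) = a :: as.filter (fun c => bs.contains c) := by
      rw [List.filter_cons]
      have : ((b :: bs).contains a) = true := by simp [hab']
      rw [if_pos this]
      congr 1
      refine List.filter_congr (fun e he => ?_)
      have hae : a < e := (List.pairwise_cons.1 ha).1 e he
      have heb : e ≠ b := fun hh => absurd (hab' ▸ hh ▸ hae) (lt_irrefl _)
      simp [heb]
    rw [hfa, List.map_cons]
  | case2 a as b bs hab hlt ih =>
    rw [pvMerge, if_neg (by simpa using hab), if_pos hlt]
    rw [ih (List.pairwise_cons.1 ha).2 hb]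
    have : ((a :: as).filter (fun c => (b :: bs).contains c)) = as.filter (fun c => (b :: bs).contains c) := by
      rw [List.filter_cons]
      have hna : a ∉ b :: bs := by
        intro hmem
        rcases List.mem_cons.1 hmem with rfl | h'
        · exact lt_irrefl a hlt
        · exact lt_irrefl a (lt_trans hlt ((List.pairwise_cons.1 hb).1 a h'))
      have hana : ((b :: bs).contains a) = false := by
        simpa using hna
      rw [hana]; simp
    rw [this]
  | case3 a as b bs hab hlt ih =>
    rw [pvMerge, if_neg (by simpa using hab), if_neg hlt]
    have hba : b < a := by
      rcases lt_trichotomy a b with h1 | h1 | h1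
      · exact absurd h1 hlt
      · exact absurd h1 (by simpa using hab)
      · exact h1
    rw [ih ha (List.pairwise_cons.1 hb).2]
    congr 1
    refine (List.filter_congr (fun e he => ?_)).symm
    have hbe : e ≠ b := by
      rcases List.mem_cons.1 he with rfl | he'
      · exact fun hh => absurd (hh ▸ hba) (lt_irrefl _)
      · have : a < e := (List.pairwise_cons.1 ha).1 e he'
        exact fun hh => absurd (hh ▸ lt_trans hba this) (lt_irrefl _)
    simp [hbe]
  | case4 as bs h1 =>
    cases as with
    | nil => simp [pvMerge]
    | cons a as' =>
      cases bs with
      | nil => simp [pvMerge]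
      | cons b bs' => exact (h1 a as' b bs' rfl rfl).elim

-- ===== VERDICT (by name: the statement is the Claim_ definition above) =====
set_option maxHeartbeats 1000000 in
theorem bothCountX_spec : Claim_equal_bothCountX := by
  intro string1 string2 x _
  show bothCountX string1 string2 x = bothCountX_alt string1 string2 x
  unfold bothCountX bothCountX_alt
  simp only [pv_step_eq, PySem.Dict.foldl_insert_getD_add_one_eq_counter]
  rw [pv_main]
  set l1 := (PySem.Str.lower string1).toList
  set l2 := (PySem.Str.lower string2).toList
  have hs1 : (PySem.List.sorted l1 (fun c => c) false).Pairwise (· ≤ ·) :=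
    PySem.List.sorted_pairwise l1 (fun c => c)
  have hs2 : (PySem.List.sorted l2 (fun c => c) false).Pairwise (· ≤ ·) :=
    PySem.List.sorted_pairwise l2 (fun c => c)
  have hp1 := pv_runs_pairwise x _ hs1
  have hp2 := pv_runs_pairwise x _ hs2
  rw [pv_merge_eq _ _ hp1 hp2]
  congr 1
  -- the sorted intersection equals the filtered run-scan list
  refine PySem.List.sorted_eq_of_perm_of_pairwise_lt _ _ (fun c : Char => c) ?_ (hp1.filter _)
  refine (List.perm_ext_iff_of_nodup ((hp1.imp ne_of_lt).filter _) ?_).2 ?_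
  · simp only [PySem.Set.inter]
    exact (PySem.Set.nodup_ofList _).filter _
  · intro d
    have hm1 := pv_runs_mem x _ hs1 d
    have hm2 := pv_runs_mem x _ hs2 d
    have hc1 : (PySem.List.sorted l1 (fun c => c) false).count d = l1.count d :=
      (PySem.List.sorted_perm l1 (fun c => c) false).count_eq d
    have hc2 : (PySem.List.sorted l2 (fun c => c) false).count d = l2.count d :=
      (PySem.List.sorted_perm l2 (fun c => c) false).count_eq d
    simp only [List.mem_filter, List.contains_iff_mem, hm1, hm2,
      PySem.List.mem_sorted, hc1, hc2, PySem.Set.mem_inter, PySem.Set.mem_ofList,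
      List.mem_filter, beq_iff_eq]
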